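-- pv_equiv track=rewrite | github.com/RetteraDev/RODecompile | decompiled_src/client/guis/inventoryProxy.py | tempBagDataLenth
-- ===== SOURCE A (Python) =====
-- def tempBagDataLenth(tempBagItemList):
--     ret = 0
--     flag = False
--     for i, item in enumerate(tempBagItemList[0]):
--         if item:
--             flag = True
--         else:
--             flag = False
--         if flag:
--             ret = i
--
--     return ret
-- ===== SOURCE B (Python) =====
-- def tempBagDataLenth(tempBagItemList):
--     first = tempBagItemList[0]
--     for i in range(len(first) - 1, -1, -1):
--         if first[i]:
--             return i
--     return 0
-- ===== Notes on version B (the rewrite author's own statement) =====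
-- stated objective: idiomatic
-- what changed: B scans the first sublist backwards and returns the first truthy index immediately (early exit), instead of A's forward pass that overwrites a running index and a flag; both return 0 when nothing is truthy.
import Mathlib
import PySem

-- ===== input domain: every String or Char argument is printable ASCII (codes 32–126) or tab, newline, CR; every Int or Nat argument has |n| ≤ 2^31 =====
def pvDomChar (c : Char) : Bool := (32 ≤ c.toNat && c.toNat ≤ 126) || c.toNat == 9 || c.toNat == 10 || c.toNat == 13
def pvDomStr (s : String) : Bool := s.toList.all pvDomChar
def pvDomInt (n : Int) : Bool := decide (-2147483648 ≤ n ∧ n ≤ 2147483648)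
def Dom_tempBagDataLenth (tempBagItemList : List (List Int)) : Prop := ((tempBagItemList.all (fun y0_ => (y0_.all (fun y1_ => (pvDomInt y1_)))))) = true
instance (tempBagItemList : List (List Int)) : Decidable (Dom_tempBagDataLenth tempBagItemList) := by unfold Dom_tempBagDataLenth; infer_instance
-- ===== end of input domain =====

-- B replaces A's forward pass with flag/overwrite by a backward scan with early exit; return value only.


-- ===== PORT A =====
-- literal port of A: forward pass over enumerate(first) keeping (ret, flag)
def tempBagDataLenth (tempBagItemList : List (List Int)) : Int :=
  let first := (PySem.List.pyGet? tempBagItemList 0).getD []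
  ((PySem.List.enumerate first 0).foldl
    (fun (st : Int × Bool) (p : Int × Int) =>
      let flag := if p.2 ≠ 0 then true else false
      (if flag then p.1 else st.1, flag))
    (0, false)).1

-- ===== PORT B =====
-- literal port of B: scan indices len-1 .. 0, return first truthy index, else 0
def tempBagScanBack (first : List Int) : List Int → Int
  | [] => 0
  | i :: rest => if PySem.List.pyGetD first i 0 ≠ 0 then i else tempBagScanBack first rest

def tempBagDataLenth_alt (tempBagItemList : List (List Int)) : Int :=
  let first := (PySem.List.pyGet? tempBagItemList 0).getD []
  tempBagScanBack first (PySem.List.pyRange ((first.length : Int) - 1) (-1) (-1))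

-- ===== PRECONDITION & SPEC =====
-- A (and B) raise IndexError on the empty outer list (tempBagItemList[0]); only that is excluded.
def Pre_tempBagDataLenth (tempBagItemList : List (List Int)) : Prop := tempBagItemList ≠ []
instance (tempBagItemList : List (List Int)) : Decidable (Pre_tempBagDataLenth tempBagItemList) := by unfold Pre_tempBagDataLenth; infer_instance
def pvWitness_tempBagDataLenth : List (List Int) := [[1, 0, 2], [5]]

def Spec_tempBagDataLenth (tempBagItemList : List (List Int)) (out : Int) : Prop := out = tempBagDataLenth_alt tempBagItemList
instance (tempBagItemList : List (List Int)) (out : Int) : Decidable (Spec_tempBagDataLenth tempBagItemList out) := by unfold Spec_tempBagDataLenth; infer_instance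

-- ===== CLAIM (what is proved, stated in full; the proofs are below) =====
def Claim_equal_tempBagDataLenth : Prop := ∀ (tempBagItemList : List (List Int)), Dom_tempBagDataLenth tempBagItemList → Pre_tempBagDataLenth tempBagItemList → Spec_tempBagDataLenth tempBagItemList (tempBagDataLenth tempBagItemList)

-- ===== LEMMAS AND PROOFS =====

-- the backward scan ignores an appended element when all scanned indices stay below xs.length
theorem tempBagScanBack_append (xs : List Int) (a : Int) (r : List Int)
    (h : ∀ i ∈ r, 0 ≤ i ∧ i < (xs.length : Int)) :
    tempBagScanBack (xs ++ [a]) r = tempBagScanBack xs r := by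
  induction r with
  | nil => rfl
  | cons i rest ih =>
    obtain ⟨h0, hlt⟩ := h i (by simp)
    have hget : PySem.List.pyGetD (xs ++ [a]) i 0 = PySem.List.pyGetD xs i 0 := by
      rw [PySem.List.pyGetD_eq_getElem (xs ++ [a]) 0 h0 (by simp; omega),
          PySem.List.pyGetD_eq_getElem xs 0 h0 hlt]
      rw [List.getElem_append_left (by omega)]
    simp only [tempBagScanBack, hget]
    rw [ih (fun j hj => h j (by simp [hj]))]

-- core: A's fold over xs equals B's backward scan over xs
theorem core (xs : List Int) :
    ((PySem.List.enumerate xs 0).foldl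
      (fun (st : Int × Bool) (p : Int × Int) =>
        let flag := if p.2 ≠ 0 then true else false
        (if flag then p.1 else st.1, flag))
      (0, false)).1
    = tempBagScanBack xs (PySem.List.pyRange ((xs.length : Int) - 1) (-1) (-1)) := by
  induction xs using List.reverseRecOn with
  | nil => rfl
  | append_singleton xs a ih =>
    have hcons : PySem.List.pyRange (((xs ++ [a]).length : Int) - 1) (-1) (-1)
        = ((xs.length : Int)) :: PySem.List.pyRange ((xs.length : Int) - 1) (-1) (-1) := by
      have := PySem.List.pyRange_neg_one_cons (a := ((xs ++ [a]).length : Int) - 1) (b := -1)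
        (by simp; omega)
      simpa using this
    rw [hcons]
    have hgetA : PySem.List.pyGetD (xs ++ [a]) (xs.length : Int) 0 = a := by
      rw [PySem.List.pyGetD_eq_getElem (xs ++ [a]) 0 (by omega) (by simp)]
      simp
    simp only [tempBagScanBack, hgetA]
    rw [tempBagScanBack_append xs a (PySem.List.pyRange ((xs.length : Int) - 1) (-1) (-1))
      (fun i hi => by have hm := (PySem.List.mem_pyRange_neg_one).mp hi; omega)]
    rw [PySem.List.enumerate_append, List.foldl_append]
    simp only [PySem.List.enumerate_cons, PySem.List.enumerate_nil, List.foldl_cons, List.foldl_nil]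
    by_cases ha : a = 0
    · simp only [ha, ne_eq, not_true_eq_false, if_false]
      simpa using ih
    · simp [ha]

-- ===== VERDICT (by name: the statement is the Claim_ definition above) =====
theorem tempBagDataLenth_spec : Claim_equal_tempBagDataLenth := by
  intro l _ _
  unfold Spec_tempBagDataLenth tempBagDataLenth tempBagDataLenth_alt
  exact core _
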